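-- pv_equiv track=rewrite | github.com/Gradient-PG/Human-vs-AI-text-Text-Classification-Analysis- | raid_analysis/experiments/cross_generator.py | core_neurons
-- ===== SOURCE A (Python) =====
-- def core_neurons(
--     neuron_sets: dict[str, set],
--     min_generators: int,
-- ) -> set:
--     """
--     Neurons appearing in at least ``min_generators`` discriminative sets.
--
--     Useful for identifying "universal" neurons that generalize across generators.
--     """
--     from collections import Counter
--
--     counts: Counter = Counter()
--     for s in neuron_sets.values():
--         counts.update(s)
--     return {neuron for neuron, cnt in counts.items() if cnt >= min_generators}
-- ===== SOURCE B (Python) =====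
-- def core_neurons(
--     neuron_sets: dict[str, set],
--     min_generators: int,
-- ) -> set:
--     """Same result via union-then-membership-count instead of a Counter pass."""
--     union = set().union(*neuron_sets.values())
--     return {
--         neuron
--         for neuron in union
--         if sum(1 for s in neuron_sets.values() if neuron in s) >= min_generators
--     }
-- ===== Notes on version B (the rewrite author's own statement) =====
-- stated objective: alternative
-- what changed: Replaces the single Counter-accumulation pass with building the union of all sets first and then, for each candidate neuron, counting by a fresh membership scan over all sets (nested scans instead of one counting dict).
import Mathlib
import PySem

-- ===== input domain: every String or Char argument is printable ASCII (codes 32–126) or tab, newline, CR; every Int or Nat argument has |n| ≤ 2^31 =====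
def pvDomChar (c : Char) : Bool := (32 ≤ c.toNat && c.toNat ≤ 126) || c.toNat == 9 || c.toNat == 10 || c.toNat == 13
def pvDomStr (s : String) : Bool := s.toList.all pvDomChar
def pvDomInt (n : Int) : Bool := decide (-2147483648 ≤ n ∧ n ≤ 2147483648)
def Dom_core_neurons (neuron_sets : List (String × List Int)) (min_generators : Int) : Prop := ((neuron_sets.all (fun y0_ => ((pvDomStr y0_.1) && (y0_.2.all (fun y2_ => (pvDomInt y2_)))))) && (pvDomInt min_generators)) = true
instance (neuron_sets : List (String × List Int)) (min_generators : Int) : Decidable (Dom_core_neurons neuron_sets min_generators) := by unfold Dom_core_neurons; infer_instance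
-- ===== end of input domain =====

-- B replaces A's single Counter pass by union-then-membership-count (alternative decomposition, same result).
-- ===== PORT A =====
def core_neurons (neuron_sets : List (String × List Int)) (min_generators : Int) : List Int :=
  -- counts: Counter(); for s in neuron_sets.values(): counts.update(s)
  let counts : PySem.Dict Int Int :=
    neuron_sets.foldl (fun d p => p.2.foldl (fun d x => d.modify x 0 (· + 1)) d) PySem.Dict.empty
  -- {neuron for neuron, cnt in counts.items() if cnt >= min_generators}
  (counts.items.filter (fun kv => min_generators ≤ kv.2)).map (·.1)

-- ===== PORT B =====
def core_neurons_alt (neuron_sets : List (String × List Int)) (min_generators : Int) : List Int :=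
  -- union = set().union(*neuron_sets.values())
  let union : PySem.Set Int :=
    neuron_sets.foldl (fun u p => PySem.Set.update u p.2) PySem.Set.empty
  -- {n for n in union if sum(1 for s in neuron_sets.values() if n in s) >= min_generators}
  union.filter (fun n =>
    min_generators ≤ (neuron_sets.map (fun p => if PySem.Set.contains p.2 n then (1 : Int) else 0)).sum)

-- ===== PRECONDITION & SPEC =====
-- Pre_ only encodes the type convention: each inner list models a Python set, so it holds
-- distinct elements (a Python caller cannot pass a set with duplicate elements at all).
def Pre_core_neurons (neuron_sets : List (String × List Int)) (_min_generators : Int) : Prop :=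
  ∀ p ∈ neuron_sets, p.2.Nodup
instance (neuron_sets : List (String × List Int)) (min_generators : Int) : Decidable (Pre_core_neurons neuron_sets min_generators) := by unfold Pre_core_neurons; infer_instance
def pvWitness_core_neurons : (List (String × List Int)) × Int := ([("a", [1, 2]), ("b", [2])], 2)
def Spec_core_neurons (neuron_sets : List (String × List Int)) (min_generators : Int) (out : List Int) : Prop := out = core_neurons_alt neuron_sets min_generators
instance (neuron_sets : List (String × List Int)) (min_generators : Int) (out : List Int) : Decidable (Spec_core_neurons neuron_sets min_generators out) := by unfold Spec_core_neurons; infer_instance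

-- ===== CLAIM (what is proved, stated in full; the proofs are below) =====
def Claim_equal_core_neurons : Prop := ∀ (neuron_sets : List (String × List Int)) (min_generators : Int), Dom_core_neurons neuron_sets min_generators → Pre_core_neurons neuron_sets min_generators → Spec_core_neurons neuron_sets min_generators (core_neurons neuron_sets min_generators)

-- ===== LEMMAS AND PROOFS =====

-- A's nested Counter-update loop is the Counter of the concatenation of all value lists.
theorem counts_eq_counter (ns : List (String × List Int)) :
    ns.foldl (fun d p => p.2.foldl (fun d x => d.modify x 0 (· + 1)) d) PySem.Dict.empty
      = PySem.Dict.counter (ns.flatMap (·.2)) := by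
  rw [PySem.Dict.counter_eq_foldl, List.foldl_flatMap]

-- B's union loop is set(concatenation of all value lists), in first-occurrence order.
theorem union_eq_ofList (ns : List (String × List Int)) :
    ns.foldl (fun u p => PySem.Set.update u p.2) PySem.Set.empty
      = PySem.Set.ofList (ns.flatMap (·.2)) := by
  rw [PySem.Set.ofList_eq_foldl, List.foldl_flatMap]; rfl

-- With each inner list duplicate-free, the total multiplicity of x equals the 0/1 membership sum.
theorem count_flat_eq_sum (ns : List (String × List Int)) (x : Int)
    (h : ∀ p ∈ ns, p.2.Nodup) :
    ((ns.flatMap (·.2)).count x : Int)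
      = (ns.map (fun p => if PySem.Set.contains p.2 x then (1 : Int) else 0)).sum := by
  induction ns with
  | nil => simp
  | cons p t ih =>
    have hp : p.2.Nodup := h p (by simp)
    have ht := ih (fun q hq => h q (List.mem_cons_of_mem _ hq))
    simp only [List.flatMap_cons, List.count_append, List.map_cons, List.sum_cons, Nat.cast_add,
      ← ht]
    by_cases hx : x ∈ p.2
    · simp [PySem.Set.contains, hx, List.count_eq_one_of_mem hp hx]
    · simp [PySem.Set.contains, hx, List.count_eq_zero_of_not_mem hx]

-- ===== VERDICT (by name: the statement is the Claim_ definition above) =====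
theorem core_neurons_spec : Claim_equal_core_neurons := by
  intro ns m _ hpre
  unfold Spec_core_neurons core_neurons core_neurons_alt
  rw [counts_eq_counter, union_eq_ofList]
  dsimp only
  rw [PySem.Dict.items_counter, List.filter_map, List.map_map]
  simp only [Function.comp_def, List.map_id']
  apply List.filter_congr
  intro x _
  rw [count_flat_eq_sum ns x hpre]
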